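-- pv_equiv track=rewrite | github.com/onyg/dosage-template | hl7/dosage-to-text.py | format_days_of_week
-- ===== SOURCE A (Python) =====
-- def format_days_of_week(days):
--     day_order = ['mon', 'tue', 'wed', 'thu', 'fri', 'sat', 'sun']
--     day_names = {
--         'mon': 'Montag',
--         'tue': 'Dienstag',
--         'wed': 'Mittwoch',
--         'thu': 'Donnerstag',
--         'fri': 'Freitag',
--         'sat': 'Samstag',
--         'sun': 'Sonntag'
--     }
--     # Lowercase all input days for matching
--     days_lower = [d.lower() for d in days]
--     # Sort by the canonical order
--     sorted_days = sorted(days_lower, key=lambda d: day_order.index(d) if d in day_order else 99)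
--     names = [day_names.get(day, day) for day in sorted_days]
--     if not names:
--         return ""
--     if len(names) == 1:
--         return names[0]
--     if len(names) == 2:
--         return f"{names[0]} und {names[1]}"
--     return f"{', '.join(names[:-1])} und {names[-1]}"
-- ===== SOURCE B (Python) =====
-- def format_days_of_week(days):
--     day_order = ['mon', 'tue', 'wed', 'thu', 'fri', 'sat', 'sun']
--     day_names = {
--         'mon': 'Montag',
--         'tue': 'Dienstag',
--         'wed': 'Mittwoch',
--         'thu': 'Donnerstag',
--         'fri': 'Freitag',
--         'sat': 'Samstag',
--         'sun': 'Sonntag'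
--     }
--     # Single stable bucketing pass instead of sorted(..., key=...):
--     # buckets 0..6 hold the canonical weekdays, bucket 7 the unknown
--     # days in input order; duplicates are kept.
--     buckets = {}
--     for d in days:
--         dl = d.lower()
--         i = day_order.index(dl) if dl in day_order else 7
--         buckets.setdefault(i, []).append(day_names.get(dl, dl))
--     names = []
--     for j in range(8):
--         names.extend(buckets.get(j, []))
--     if not names:
--         return ""
--     if len(names) == 1:
--         return names[0]
--     return ", ".join(names[:-1]) + " und " + names[-1]
-- ===== Notes on version B (the rewrite author's own statement) =====
-- stated objective: alternative
-- what changed: Replaces sorted(..., key=day_order.index) with a single stable bucketing pass (dict of 7 weekday buckets plus an unknown-days bucket, concatenated in canonical order), and merges the two-name case into the general join formula.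
import Mathlib
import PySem

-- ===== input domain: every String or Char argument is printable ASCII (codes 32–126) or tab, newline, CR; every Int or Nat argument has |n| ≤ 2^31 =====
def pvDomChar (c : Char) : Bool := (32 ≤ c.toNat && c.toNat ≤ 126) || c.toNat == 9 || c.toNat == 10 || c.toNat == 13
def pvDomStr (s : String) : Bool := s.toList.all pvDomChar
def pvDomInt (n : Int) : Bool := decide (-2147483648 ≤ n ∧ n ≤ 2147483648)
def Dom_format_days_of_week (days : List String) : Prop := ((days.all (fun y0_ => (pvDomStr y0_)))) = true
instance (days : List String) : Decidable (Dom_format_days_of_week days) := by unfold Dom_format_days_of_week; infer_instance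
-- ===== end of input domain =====

-- B replaces A's stable sort by key with one stable bucketing pass (7 weekday buckets + an
-- unknown-days bucket, concatenated in canonical order); same output, alternative algorithm.

-- ===== PORT A =====
def pvDayOrder : List String := ["mon", "tue", "wed", "thu", "fri", "sat", "sun"]

def pvDayNames : PySem.Dict String String :=
  PySem.Dict.ofList [("mon", "Montag"), ("tue", "Dienstag"), ("wed", "Mittwoch"),
    ("thu", "Donnerstag"), ("fri", "Freitag"), ("sat", "Samstag"), ("sun", "Sonntag")]

-- day_names.get(day, day)
def pvName (d : String) : String := pvDayNames.getD d d

-- the sort key: day_order.index(d) if d in day_order else 99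
def pvKeyA (d : String) : Nat :=
  if d ∈ pvDayOrder then (PySem.List.index? pvDayOrder d).getD 0 else 99

def format_days_of_week (days : List String) : String :=
  let days_lower := days.map (fun d => PySem.Str.lower d)
  let sorted_days := PySem.List.sorted days_lower (fun d => pvKeyA d)
  let names := sorted_days.map (fun day => pvName day)
  if names = [] then ""
  else if names.length = 1 then PySem.List.pyGetD names 0 ""
  else if names.length = 2 then
    PySem.List.pyGetD names 0 "" ++ " und " ++ PySem.List.pyGetD names 1 ""
  else
    PySem.Str.join ", " (PySem.List.slice names none (some (-1))) ++ " und " ++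
      PySem.List.pyGetD names (-1) ""

-- ===== PORT B =====
-- bucket index: day_order.index(dl) if dl in day_order else 7
def pvBidx (dl : String) : Int :=
  if dl ∈ pvDayOrder then ((PySem.List.index? pvDayOrder dl).getD 0 : Nat) else 7

def format_days_of_week_alt (days : List String) : String :=
  let buckets := days.foldl (fun b d =>
      let dl := PySem.Str.lower d
      b.modify (pvBidx dl) [] (fun l => l ++ [pvName dl])) PySem.Dict.empty
  let names := (PySem.List.pyRange 0 8 1).foldl (fun acc j => acc ++ buckets.getD j []) []
  if names = [] then ""
  else if names.length = 1 then PySem.List.pyGetD names 0 ""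
  else
    PySem.Str.join ", " (PySem.List.slice names none (some (-1))) ++ " und " ++
      PySem.List.pyGetD names (-1) ""

-- ===== PRECONDITION & SPEC =====
def Spec_format_days_of_week (days : List String) (out : String) : Prop := out = format_days_of_week_alt days
instance (days : List String) (out : String) : Decidable (Spec_format_days_of_week days out) := by unfold Spec_format_days_of_week; infer_instance

-- ===== CLAIM (what is proved, stated in full; the proofs are below) =====
def Claim_equal_format_days_of_week : Prop := ∀ (days : List String), Dom_format_days_of_week days → Spec_format_days_of_week days (format_days_of_week days)

-- ===== LEMMAS AND PROOFS =====

-- insertBy skips a prefix it does not go before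
theorem pv_insertBy_append_left {α : Type} (before : α → α → Bool) (x : α) (l1 l2 : List α)
    (h : ∀ y ∈ l1, before x y = false) :
    PySem.List.insertBy before x (l1 ++ l2) = l1 ++ PySem.List.insertBy before x l2 := by
  induction l1 with
  | nil => simp
  | cons y t ih =>
    have hy : before x y = false := h y (by simp)
    simp only [List.cons_append, PySem.List.insertBy, hy, Bool.false_eq_true, if_false]
    exact congrArg (y :: ·) (ih (fun z hz => h z (by simp [hz])))

theorem pv_insertBy_of_forall_before {α : Type} (before : α → α → Bool) (x : α) (l : List α)
    (h : ∀ y ∈ l, before x y = true) :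
    PySem.List.insertBy before x l = x :: l := by
  cases l with
  | nil => rfl
  | cons y t => simp [PySem.List.insertBy, h y (by simp)]

-- stable sort with a Nat key whose values all lie in a strictly increasing list ks
-- equals the concatenation of the key-buckets in the order of ks
theorem pv_stable_sort_buckets {α : Type} (key : α → Nat) (ks : List Nat)
    (hks : ks.Pairwise (· < ·)) (xs : List α) (hall : ∀ x ∈ xs, key x ∈ ks) :
    PySem.List.sorted xs (fun x => key x) =
      (ks.map (fun k => xs.filter (fun x => key x == k))).flatten := by
  induction xs using List.reverseRecOn with
  | nil => rw [PySem.List.sorted_eq_foldl_insertBy]; simp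
  | append_singleton xs x ih =>
    have hx : key x ∈ ks := hall x (by simp)
    obtain ⟨ks1, ks2, hdecomp⟩ := List.append_of_mem hx
    subst hdecomp
    rw [List.pairwise_append] at hks
    obtain ⟨hp1, hp2, hcross⟩ := hks
    have h2 : ∀ k ∈ ks2, key x < k := (List.pairwise_cons.mp hp2).1
    have h1 : ∀ k ∈ ks1, k < key x := fun k hk => hcross k hk (key x) (by simp)
    rw [PySem.List.sorted_eq_foldl_insertBy, List.foldl_append,
      ← PySem.List.sorted_eq_foldl_insertBy,
      ih (fun y hy => hall y (by simp [hy]))]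
    simp only [List.foldl_cons, List.foldl_nil]
    -- abbreviations
    set F := fun k => xs.filter (fun y => key y == k) with hF
    have hmemF : ∀ {k y}, y ∈ F k → key y = k := by
      intro k y hy
      simpa using (List.mem_filter.mp hy).2
    -- left side: insert x into the flattened buckets of xs
    have hL : (List.map F (ks1 ++ key x :: ks2)).flatten =
        ((List.map F ks1).flatten ++ F (key x)) ++ (List.map F ks2).flatten := by
      simp [List.append_assoc]
    rw [hL, pv_insertBy_append_left _ x _ _ (by
      intro y hy
      rcases List.mem_append.mp hy with hy1 | hy2
      · obtain ⟨l, hl, hyl⟩ := List.mem_flatten.mp hy1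
        obtain ⟨k, hk, rfl⟩ := List.mem_map.mp hl
        have := hmemF hyl
        have := h1 k hk
        simp only [decide_eq_false_iff_not]
        omega
      · have := hmemF hy2
        simp only [decide_eq_false_iff_not]
        omega),
      pv_insertBy_of_forall_before _ x _ (by
        intro y hy
        obtain ⟨l, hl, hyl⟩ := List.mem_flatten.mp hy
        obtain ⟨k, hk, rfl⟩ := List.mem_map.mp hl
        have := hmemF hyl
        have := h2 k hk
        simp only [decide_eq_true_eq]
        omega)]
    -- right side: the filters over xs ++ [x]
    have hf1 : List.map (fun k => (xs ++ [x]).filter (fun y => key y == k)) ks1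
        = List.map F ks1 := by
      apply List.map_congr_left
      intro k hk
      have hne : (key x == k) = false := by
        have := h1 k hk; simp; omega
      simp [List.filter_append, hne, hF]
    have hf2 : List.map (fun k => (xs ++ [x]).filter (fun y => key y == k)) ks2
        = List.map F ks2 := by
      apply List.map_congr_left
      intro k hk
      have hne : (key x == k) = false := by
        have := h2 k hk; simp; omega
      simp [List.filter_append, hne, hF]
    have hfx : (xs ++ [x]).filter (fun y => key y == key x) = F (key x) ++ [x] := by
      simp [List.filter_append, hF]
    simp only [List.map_append, List.map_cons, List.flatten_append, List.flatten_cons,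
      hf1, hf2, hfx]
    simp [List.append_assoc]

-- the key values of A
theorem pv_keyA_mem (d : String) : pvKeyA d ∈ ([0, 1, 2, 3, 4, 5, 6, 99] : List Nat) := by
  unfold pvKeyA
  split
  · next h =>
    simp only [pvDayOrder, List.mem_cons, List.not_mem_nil, or_false] at h
    rcases h with rfl | rfl | rfl | rfl | rfl | rfl | rfl <;> decide
  · simp

-- relation between A's sort key and B's bucket index
theorem pv_key_bidx (d : String) :
    (pvKeyA d = (pvBidx d).toNat ∧ 0 ≤ pvBidx d ∧ pvBidx d ≤ 6) ∨
      (pvKeyA d = 99 ∧ pvBidx d = 7) := by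
  by_cases h : d ∈ pvDayOrder
  · left
    simp only [pvDayOrder, List.mem_cons, List.not_mem_nil, or_false] at h
    rcases h with rfl | rfl | rfl | rfl | rfl | rfl | rfl <;>
      exact ⟨by decide, by decide, by decide⟩
  · right
    simp [pvKeyA, pvBidx, h]

theorem pv_filter_key_eq (xs : List String) (j k : Nat)
    (hjk : (j ≤ 6 ∧ k = j) ∨ (j = 7 ∧ k = 99)) :
    xs.filter (fun d => pvKeyA d == k) =
      xs.filter (fun d => pvBidx d == (j : Int)) := by
  apply List.filter_congr
  intro d _
  rcases pv_key_bidx d with ⟨h1, h2, h3⟩ | ⟨h1, h2⟩ <;>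
    rw [Bool.eq_iff_iff] <;> simp only [beq_iff_eq] <;> omega

-- B's bucket dictionary, characterised
theorem pv_buckets_getD (days : List String) (c : Int) :
    (days.foldl (fun b d =>
        let dl := PySem.Str.lower d
        b.modify (pvBidx dl) [] (fun l => l ++ [pvName dl])) PySem.Dict.empty).getD c []
      = ((days.map (fun d => PySem.Str.lower d)).filter
          (fun dl => pvBidx dl == c)).map (fun dl => pvName dl) := by
  have h := PySem.Dict.getD_foldl_modify_append
    (days.map (fun d => (pvBidx (PySem.Str.lower d), pvName (PySem.Str.lower d))))
    (PySem.Dict.empty) c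
  rw [List.foldl_map] at h
  simp only [h]
  simp [List.filter_map, List.map_map, Function.comp_def]

-- the two name lists coincide
theorem pv_names_eq (days : List String) :
    (PySem.List.sorted (days.map (fun d => PySem.Str.lower d)) (fun d => pvKeyA d)).map
        (fun day => pvName day)
      = (PySem.List.pyRange 0 8 1).foldl (fun acc j => acc ++
          (days.foldl (fun b d =>
            let dl := PySem.Str.lower d
            b.modify (pvBidx dl) [] (fun l => l ++ [pvName dl])) PySem.Dict.empty).getD j []) [] := by
  have hrange : PySem.List.pyRange 0 8 1 = [0, 1, 2, 3, 4, 5, 6, 7] := by decide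
  rw [hrange]
  simp only [List.foldl_cons, List.foldl_nil, pv_buckets_getD]
  rw [pv_stable_sort_buckets pvKeyA [0, 1, 2, 3, 4, 5, 6, 99] (by decide)
    (days.map (fun d => PySem.Str.lower d)) (fun x _ => pv_keyA_mem x)]
  have e0 := pv_filter_key_eq (days.map (fun d => PySem.Str.lower d)) 0 0 (by omega)
  have e1 := pv_filter_key_eq (days.map (fun d => PySem.Str.lower d)) 1 1 (by omega)
  have e2 := pv_filter_key_eq (days.map (fun d => PySem.Str.lower d)) 2 2 (by omega)
  have e3 := pv_filter_key_eq (days.map (fun d => PySem.Str.lower d)) 3 3 (by omega)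
  have e4 := pv_filter_key_eq (days.map (fun d => PySem.Str.lower d)) 4 4 (by omega)
  have e5 := pv_filter_key_eq (days.map (fun d => PySem.Str.lower d)) 5 5 (by omega)
  have e6 := pv_filter_key_eq (days.map (fun d => PySem.Str.lower d)) 6 6 (by omega)
  have e7 := pv_filter_key_eq (days.map (fun d => PySem.Str.lower d)) 7 99 (by omega)
  simp only [List.map_cons, List.map_nil, List.flatten_cons, List.flatten_nil,
    List.map_append, e0, e1, e2, e3, e4, e5, e6, e7]
  norm_num [List.append_assoc]

-- the output formatting agrees once the name lists agree
theorem pv_format_tail (n : List String) :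
    (if n = [] then "" else if n.length = 1 then PySem.List.pyGetD n 0 ""
      else if n.length = 2 then
        PySem.List.pyGetD n 0 "" ++ " und " ++ PySem.List.pyGetD n 1 ""
      else PySem.Str.join ", " (PySem.List.slice n none (some (-1))) ++ " und " ++
        PySem.List.pyGetD n (-1) "")
    = (if n = [] then "" else if n.length = 1 then PySem.List.pyGetD n 0 ""
      else PySem.Str.join ", " (PySem.List.slice n none (some (-1))) ++ " und " ++
        PySem.List.pyGetD n (-1) "") := by
  match n with
  | [] => rfl
  | [a] => simp
  | [a, b] =>
    simp only [List.cons_ne_nil, if_false, List.length_cons, List.length_nil]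
    norm_num
    rw [PySem.List.slice_to_neg_one, PySem.List.pyGetD_neg_one _ _ (by simp)]
    simp [PySem.Str.join]
    constructor
  | a :: b :: c :: t =>
    simp only [List.cons_ne_nil, if_false, List.length_cons]
    split_ifs <;> first | rfl | omega

-- ===== VERDICT (by name: the statement is the Claim_ definition above) =====
theorem format_days_of_week_spec : Claim_equal_format_days_of_week := by
  intro days _
  unfold Spec_format_days_of_week format_days_of_week format_days_of_week_alt
  simp only []
  rw [pv_names_eq days]
  exact pv_format_tail _
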